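-- pv_equiv track=rewrite | github.com/ICSE26Autoscope/Autoscope | AutoScope/spanselection/utils/GraphUtil.py | split_path_into_segments
-- ===== SOURCE A (Python) =====
-- from collections import defaultdict, deque
--
-- def split_path_into_segments(edge_list, path):
--
--     graph = defaultdict(list)
--     for u, v in edge_list:
--         graph[u].append(v)
--
--     segments = []
--     current_segment = []
--
--     for i in range(len(path)):
--         node = path[i]
--         current_segment.append(node)
--
--         successors = graph.get(node, [])
--
--         if len(successors) > 1:
--             segments.append(current_segment)
--             current_segment = []
--         elif i == len(path) - 1:
--             segments.append(current_segment)
--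
--     return segments
-- ===== SOURCE B (Python) =====
-- from collections import Counter
--
--
-- def split_path_into_segments(edge_list, path):
--     # Out-degree of each node, then peel off one segment at a time:
--     # each segment runs up to and including the first branching node.
--     outdeg = Counter(u for u, _ in edge_list)
--     segments = []
--     rest = path
--     while rest:
--         k = next((j for j, n in enumerate(rest) if outdeg[n] > 1), None)
--         if k is None:
--             segments.append(rest)
--             break
--         segments.append(rest[:k + 1])
--         rest = rest[k + 1:]
--     return segments
-- ===== Notes on version B (the rewrite author's own statement) =====
-- stated objective: alternative
-- what changed: Replaces the grow-and-flush accumulator over indexed path positions (with its last-index special case) by an out-degree Counter plus repeated split-at-first-branching-node slicing of the remaining path.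
import Mathlib
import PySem

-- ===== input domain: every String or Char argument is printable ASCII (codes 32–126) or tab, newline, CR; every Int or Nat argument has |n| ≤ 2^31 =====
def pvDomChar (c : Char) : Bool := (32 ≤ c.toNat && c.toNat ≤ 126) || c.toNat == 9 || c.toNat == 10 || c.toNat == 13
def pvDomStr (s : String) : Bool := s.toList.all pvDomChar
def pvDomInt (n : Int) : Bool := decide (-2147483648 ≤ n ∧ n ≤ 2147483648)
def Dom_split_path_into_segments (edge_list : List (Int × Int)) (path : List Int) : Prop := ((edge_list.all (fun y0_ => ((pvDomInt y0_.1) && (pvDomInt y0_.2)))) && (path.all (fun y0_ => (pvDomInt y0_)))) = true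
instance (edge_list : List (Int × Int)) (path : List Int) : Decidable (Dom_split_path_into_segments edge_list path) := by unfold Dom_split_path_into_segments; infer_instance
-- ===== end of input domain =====

-- B replaces A's grow-and-flush accumulator loop by an out-degree counter plus
-- repeated split-at-first-branching-node slicing (alternative decomposition, same cost).

-- ===== PORT A =====
-- graph = defaultdict(list); for u, v in edge_list: graph[u].append(v)
def pvGraphA (edge_list : List (Int × Int)) : PySem.Dict Int (List Int) :=
  edge_list.foldl (fun g uv => g.insert uv.1 ((g.getD uv.1 []) ++ [uv.2])) PySem.Dict.empty

-- the body of A's 'for i in range(len(path))' loop, state = (segments, current_segment)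
def pvStepA (g : PySem.Dict Int (List Int)) (L : Int)
    (st : List (List Int) × List Int) (inode : Int × Int) : List (List Int) × List Int :=
  let cur := st.2 ++ [inode.2]
  let successors := g.getD inode.2 []
  if successors.length > 1 then (st.1 ++ [cur], [])
  else if inode.1 = L - 1 then (st.1 ++ [cur], cur)
  else (st.1, cur)

def split_path_into_segments (edge_list : List (Int × Int)) (path : List Int) : List (List Int) :=
  ((PySem.List.enumerate path).foldl
    (pvStepA (pvGraphA edge_list) ((path.length : Int))) ([], [])).1

-- ===== PORT B =====
-- the 'while rest:' loop of B: slice off rest[:k+1] at the first branching node k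
def pvSplitRest (p : Int → Bool) (rest : List Int) : List (List Int) :=
  if hnil : rest = [] then []
  else
    match List.findIdx? p rest with
    | none => [rest]
    | some k => rest.take (k + 1) :: pvSplitRest p (rest.drop (k + 1))
termination_by rest.length
decreasing_by
  have := List.length_pos_of_ne_nil hnil
  simp only [List.length_drop]; omega

def split_path_into_segments_alt (edge_list : List (Int × Int)) (path : List Int) : List (List Int) :=
  let outdeg : PySem.Dict Int Int := PySem.Dict.counter (edge_list.map (fun uv => uv.1))
  pvSplitRest (fun n => decide (outdeg.getD n 0 > 1)) path

-- ===== PRECONDITION & SPEC =====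
def Spec_split_path_into_segments (edge_list : List (Int × Int)) (path : List Int) (out : List (List Int)) : Prop := out = split_path_into_segments_alt edge_list path
instance (edge_list : List (Int × Int)) (path : List Int) (out : List (List Int)) : Decidable (Spec_split_path_into_segments edge_list path out) := by unfold Spec_split_path_into_segments; infer_instance

-- ===== CLAIM (what is proved, stated in full; the proofs are below) =====
def Claim_equal_split_path_into_segments : Prop := ∀ (edge_list : List (Int × Int)) (path : List Int), Dom_split_path_into_segments edge_list path → Spec_split_path_into_segments edge_list path (split_path_into_segments edge_list path)

-- ===== LEMMAS AND PROOFS =====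

-- proof-only recursion capturing A's loop: append node to cur, flush at branches,
-- and flush the (always nonempty) cur when the last element is reached
def pvALoop (p : Int → Bool) : List Int → List Int → List (List Int)
  | cur, [] => if cur = [] then [] else [cur]
  | cur, n :: rest =>
      if p n then (cur ++ [n]) :: pvALoop p [] rest else pvALoop p (cur ++ [n]) rest

-- out-degree agreement: list length in A's adjacency dict = B's counter value
lemma pvGraph_foldl_getD (el : List (Int × Int)) (n : Int) :
    ∀ g : PySem.Dict Int (List Int),
      (((el.foldl (fun g uv => g.insert uv.1 ((g.getD uv.1 []) ++ [uv.2])) g).getD n []).length)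
        = (g.getD n []).length + (el.map (fun uv => uv.1)).count n := by
  induction el with
  | nil => intro g; simp
  | cons uv el' ih =>
    intro g
    simp only [List.foldl_cons, ih, List.map_cons]
    by_cases hn : n = uv.1
    · subst hn
      rw [PySem.Dict.getD_insert_self]
      simp
      omega
    · rw [PySem.Dict.getD_insert_of_ne _ _ _ hn]
      simp [Ne.symm hn]

lemma pvDeg_eq (el : List (Int × Int)) (n : Int) :
    ((pvGraphA el).getD n []).length = (el.map (fun uv => uv.1)).count n := by
  have := pvGraph_foldl_getD el n PySem.Dict.empty
  simpa [pvGraphA] using this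

-- A's indexed fold equals pvALoop (for a nonempty remainder)
lemma pvFoldA_eq_aloop (g : PySem.Dict Int (List Int)) (L : Int) :
    ∀ (rest : List Int) (i : Int) (segs : List (List Int)) (cur : List Int),
      i + rest.length = L → rest ≠ [] →
      ((PySem.List.enumerate rest i).foldl (pvStepA g L) (segs, cur)).1
        = segs ++ pvALoop (fun n => decide ((g.getD n []).length > 1)) cur rest := by
  intro rest
  induction rest with
  | nil => intro i segs cur _ hne; exact absurd rfl hne
  | cons n rest' ih =>
    intro i segs cur hlen _
    rw [PySem.List.enumerate_cons, List.foldl_cons]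
    by_cases hp : (g.getD n []).length > 1
    · have hstep : pvStepA g L (segs, cur) (i, n) = (segs ++ [cur ++ [n]], []) := by
        simp [pvStepA, hp]
      rw [hstep]
      have hal : pvALoop (fun n => decide ((g.getD n []).length > 1)) cur (n :: rest')
          = (cur ++ [n]) :: pvALoop (fun n => decide ((g.getD n []).length > 1)) [] rest' := by
        simp [pvALoop, hp]
      rw [hal]
      rcases eq_or_ne rest' [] with h' | h'
      · subst h'; simp [pvALoop, PySem.List.enumerate]
      · have := ih (i + 1) (segs ++ [cur ++ [n]]) [] (by simp only [List.length_cons] at hlen; push_cast at hlen ⊢; omega) h'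
        rw [this]; simp
    · have hal : pvALoop (fun n => decide ((g.getD n []).length > 1)) cur (n :: rest')
          = pvALoop (fun n => decide ((g.getD n []).length > 1)) (cur ++ [n]) rest' := by
        simp [pvALoop, hp]
      rw [hal]
      rcases eq_or_ne rest' [] with h' | h'
      · subst h'
        have hi : i = L - 1 := by
          simp only [List.length_cons, List.length_nil] at hlen; push_cast at hlen; omega
        have hstep : pvStepA g L (segs, cur) (i, n) = (segs ++ [cur ++ [n]], cur ++ [n]) := by
          simp [pvStepA, hp, hi]
        rw [hstep]
        simp [pvALoop, PySem.List.enumerate]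
      · have hi : ¬ (i = L - 1) := by
          have h1 : (1 : Int) ≤ rest'.length := by
            exact_mod_cast Nat.one_le_iff_ne_zero.mpr (by simpa using h')
          simp only [List.length_cons] at hlen; push_cast at hlen; omega
        have hstep : pvStepA g L (segs, cur) (i, n) = (segs, cur ++ [n]) := by
          simp [pvStepA, hp, hi]
        rw [hstep]
        exact ih (i + 1) segs (cur ++ [n]) (by simp only [List.length_cons] at hlen; push_cast at hlen ⊢; omega) h'

-- pvALoop with arbitrary cur vs B's slicing recursion
lemma pvALoop_splitRest (p : Int → Bool) :
    ∀ (N : Nat) (rest : List Int), rest.length ≤ N → rest ≠ [] → ∀ cur,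
      ∃ h t, pvSplitRest p rest = h :: t ∧ pvALoop p cur rest = (cur ++ h) :: t := by
  intro N
  induction N with
  | zero => intro rest hlen hne; exact absurd (List.eq_nil_of_length_eq_zero (by omega)) hne
  | succ N ih =>
    intro rest hlen hne cur
    rcases rest with _ | ⟨x, rest'⟩
    · exact absurd rfl hne
    by_cases hp : p x
    · -- first branching node is x itself
      have hfind : List.findIdx? p (x :: rest') = some 0 := by
        simp [List.findIdx?_cons, hp]
      have hsplit : pvSplitRest p (x :: rest') = [x] :: pvSplitRest p rest' := by
        rw [pvSplitRest]; simp [hfind]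
      have haux : pvALoop p [] rest' = pvSplitRest p rest' := by
        rcases eq_or_ne rest' [] with h' | h'
        · subst h'; rw [pvSplitRest]; simp [pvALoop]
        · obtain ⟨h, t, hs, ha⟩ := ih rest' (by simp at hlen; omega) h' []
          rw [hs, ha]; simp
      refine ⟨[x], pvSplitRest p rest', hsplit, ?_⟩
      simp [pvALoop, hp, haux]
    · have hfind : List.findIdx? p (x :: rest') = (List.findIdx? p rest').map (· + 1) := by
        simp [List.findIdx?_cons, hp]
      rcases eq_or_ne rest' [] with h' | h'
      · subst h'
        have : List.findIdx? p ([] : List Int) = none := by simp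
        refine ⟨[x], [], ?_, ?_⟩
        · rw [pvSplitRest]; simp [hfind]
        · simp [pvALoop, hp]
      · obtain ⟨h, t, hs, ha⟩ := ih rest' (by simp at hlen; omega) h' (cur ++ [x])
        refine ⟨x :: h, t, ?_, ?_⟩
        · rcases hcase : List.findIdx? p rest' with _ | k
          · -- no branching node at all: one big segment
            have hrest : pvSplitRest p rest' = [rest'] := by
              rw [pvSplitRest]; simp [h', hcase]
            rw [hrest] at hs
            obtain ⟨hh, ht⟩ : rest' = h ∧ ([] : List (List Int)) = t := by
              simpa using hs
            rw [pvSplitRest]; simp [hfind, hcase, ← hh, ← ht]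
          · have hrest : pvSplitRest p rest'
                = rest'.take (k + 1) :: pvSplitRest p (rest'.drop (k + 1)) := by
              rw [pvSplitRest]; simp [h', hcase]
            rw [hrest] at hs
            obtain ⟨hh, ht⟩ : rest'.take (k + 1) = h ∧ pvSplitRest p (rest'.drop (k + 1)) = t := by
              simpa using hs
            rw [pvSplitRest]
            simp [hfind, hcase, List.take_succ_cons, List.drop_succ_cons, hh, ht]
        · have : pvALoop p cur (x :: rest') = pvALoop p (cur ++ [x]) rest' := by
            simp [pvALoop, hp]
          rw [this, ha]; simp

-- ===== VERDICT (by name: the statement is the Claim_ definition above) =====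
theorem split_path_into_segments_spec : Claim_equal_split_path_into_segments := by
  intro el path _
  unfold Spec_split_path_into_segments
  have hp : (fun n => decide (((pvGraphA el).getD n []).length > 1))
      = (fun n => decide ((PySem.Dict.counter (el.map (fun uv => uv.1))).getD n 0 > 1)) := by
    funext n
    apply decide_eq_decide.mpr
    rw [pvDeg_eq, PySem.Dict.getD_counter]
    constructor <;> intro h <;> exact_mod_cast h
  show split_path_into_segments el path
      = pvSplitRest (fun n => decide ((PySem.Dict.counter (el.map (fun uv => uv.1))).getD n 0 > 1)) path
  rw [← hp]
  unfold split_path_into_segments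
  rcases eq_or_ne path [] with hpath | hpath
  · subst hpath
    rw [pvSplitRest]; simp [PySem.List.enumerate]
  · rw [pvFoldA_eq_aloop (pvGraphA el) ((path.length : Int)) path 0 [] [] (by simp) hpath]
    obtain ⟨h, t, hs, ha⟩ :=
      pvALoop_splitRest (fun n => decide (((pvGraphA el).getD n []).length > 1))
        path.length path (le_refl _) hpath []
    rw [ha, hs]; simp
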